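-- pv_equiv track=rewrite | github.com/Georgi-Zahariev/ai-disaster-response | backend/agents/vision_analyzer.py | _extract_sectors
-- ===== SOURCE A (Python) =====
-- from typing import List, Dict, Any
--
-- def _extract_sectors(
--
--     detected_objects: List[Dict[str, Any]],
--     scene_analysis: Dict[str, Any],
--     metadata: Dict[str, Any]
-- ) -> List[str]:
--     """Extract affected supply chain sectors from visual analysis."""
--     # TODO: Replace with sector classification model
--
--     # Use metadata hint if available
--     sectors_hint = metadata.get("sectors_hint", [])
--     if sectors_hint:
--         return sectors_hint
--
--     sectors = []
--     object_labels = [obj.get("label", "").lower() for obj in detected_objects]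
--
--     # Transportation sector indicators
--     if any(label in object_labels for label in ["vehicle", "truck", "car", "road"]):
--         sectors.append("transportation")
--
--     # Logistics sector indicators
--     if any(label in object_labels for label in ["container", "cargo", "crane", "ship", "vessel"]):
--         sectors.append("logistics")
--
--     # Warehousing sector indicators
--     if any(label in object_labels for label in ["warehouse", "building", "storage"]):
--         sectors.append("warehousing")
--
--     # Energy sector indicators
--     if any(label in object_labels for label in ["pipeline", "refinery", "tank", "power_line"]):
--         sectors.append("energy")
--
--     # Manufacturing sector indicators
--     if any(label in object_labels for label in ["factory", "plant", "industrial"]):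
--         sectors.append("manufacturing")
--
--     return sectors if sectors else ["transportation"]
-- ===== SOURCE B (Python) =====
-- _KEYWORD_TO_SECTOR = {
--     "vehicle": "transportation", "truck": "transportation",
--     "car": "transportation", "road": "transportation",
--     "container": "logistics", "cargo": "logistics", "crane": "logistics",
--     "ship": "logistics", "vessel": "logistics",
--     "warehouse": "warehousing", "building": "warehousing", "storage": "warehousing",
--     "pipeline": "energy", "refinery": "energy", "tank": "energy", "power_line": "energy",
--     "factory": "manufacturing", "plant": "manufacturing", "industrial": "manufacturing",
-- }
--
-- _SECTOR_ORDER = ["transportation", "logistics", "warehousing", "energy", "manufacturing"]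
--
--
-- def _extract_sectors(detected_objects, scene_analysis, metadata):
--     sectors_hint = metadata.get("sectors_hint", [])
--     if sectors_hint:
--         return sectors_hint
--
--     found = set()
--     for obj in detected_objects:
--         sector = _KEYWORD_TO_SECTOR.get(obj.get("label", "").lower())
--         if sector is not None:
--             found.add(sector)
--
--     result = [s for s in _SECTOR_ORDER if s in found]
--     return result if result else ["transportation"]
-- ===== Notes on version B (the rewrite author's own statement) =====
-- stated objective: idiomatic
-- what changed: Replaces five per-sector any-scans over the label list with a single pass over the labels using a keyword-to-sector lookup table that fills a found-set, then emits sectors in the canonical order.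
import Mathlib
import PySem

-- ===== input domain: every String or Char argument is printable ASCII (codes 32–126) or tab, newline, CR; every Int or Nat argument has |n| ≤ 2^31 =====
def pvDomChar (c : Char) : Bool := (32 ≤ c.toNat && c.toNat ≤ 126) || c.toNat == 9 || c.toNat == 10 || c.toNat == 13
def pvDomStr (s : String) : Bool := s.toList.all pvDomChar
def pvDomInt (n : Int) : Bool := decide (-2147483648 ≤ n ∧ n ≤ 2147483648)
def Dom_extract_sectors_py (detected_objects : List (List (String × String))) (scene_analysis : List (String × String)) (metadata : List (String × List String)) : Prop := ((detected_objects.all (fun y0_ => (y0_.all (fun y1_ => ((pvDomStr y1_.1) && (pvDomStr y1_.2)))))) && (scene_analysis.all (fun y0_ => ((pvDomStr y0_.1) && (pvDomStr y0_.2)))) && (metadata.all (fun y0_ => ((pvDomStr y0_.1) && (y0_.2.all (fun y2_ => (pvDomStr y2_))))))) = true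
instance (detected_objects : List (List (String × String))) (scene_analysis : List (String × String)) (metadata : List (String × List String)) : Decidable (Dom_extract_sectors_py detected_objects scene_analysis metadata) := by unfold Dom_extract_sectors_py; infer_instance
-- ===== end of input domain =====

-- B replaces A's five per-sector scans of the label list by one pass over the labels
-- with a keyword→sector lookup table feeding a found-set (idiomatic; same result).

-- ===== PORT A =====
-- dicts are association lists; .get k d = first match (List.lookup) with default
def extract_sectors_py (detected_objects : List (List (String × String))) (scene_analysis : List (String × String)) (metadata : List (String × List String)) : List String :=
  let sectors_hint := (metadata.lookup "sectors_hint").getD []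
  if sectors_hint ≠ [] then sectors_hint
  else
    let object_labels := detected_objects.map (fun obj => PySem.Str.lower ((obj.lookup "label").getD ""))
    let sectors : List String := []
    let sectors := if (["vehicle", "truck", "car", "road"].any (fun label => object_labels.contains label)) then sectors ++ ["transportation"] else sectors
    let sectors := if (["container", "cargo", "crane", "ship", "vessel"].any (fun label => object_labels.contains label)) then sectors ++ ["logistics"] else sectors
    let sectors := if (["warehouse", "building", "storage"].any (fun label => object_labels.contains label)) then sectors ++ ["warehousing"] else sectors
    let sectors := if (["pipeline", "refinery", "tank", "power_line"].any (fun label => object_labels.contains label)) then sectors ++ ["energy"] else sectors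
    let sectors := if (["factory", "plant", "industrial"].any (fun label => object_labels.contains label)) then sectors ++ ["manufacturing"] else sectors
    if sectors ≠ [] then sectors else ["transportation"]

-- ===== PORT B =====
-- the literal keyword→sector dict of Source B (distinct keys, so first-match lookup is exact)
def pvKeywordSector : List (String × String) :=
  [("vehicle", "transportation"), ("truck", "transportation"),
   ("car", "transportation"), ("road", "transportation"),
   ("container", "logistics"), ("cargo", "logistics"), ("crane", "logistics"),
   ("ship", "logistics"), ("vessel", "logistics"),
   ("warehouse", "warehousing"), ("building", "warehousing"), ("storage", "warehousing"),
   ("pipeline", "energy"), ("refinery", "energy"), ("tank", "energy"), ("power_line", "energy"),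
   ("factory", "manufacturing"), ("plant", "manufacturing"), ("industrial", "manufacturing")]

def pvSectorOrder : List String :=
  ["transportation", "logistics", "warehousing", "energy", "manufacturing"]

def extract_sectors_py_alt (detected_objects : List (List (String × String))) (scene_analysis : List (String × String)) (metadata : List (String × List String)) : List String :=
  let sectors_hint := (metadata.lookup "sectors_hint").getD []
  if sectors_hint ≠ [] then sectors_hint
  else
    let found : PySem.Set String := detected_objects.foldl
      (fun s obj =>
        match pvKeywordSector.lookup (PySem.Str.lower ((obj.lookup "label").getD "")) with
        | some sector => PySem.Set.add s sector
        | none => s) PySem.Set.empty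
    let result := pvSectorOrder.filter (fun s => PySem.Set.contains found s)
    if result ≠ [] then result else ["transportation"]

-- ===== PRECONDITION & SPEC =====
def Spec_extract_sectors_py (detected_objects : List (List (String × String))) (scene_analysis : List (String × String)) (metadata : List (String × List String)) (out : List String) : Prop := out = extract_sectors_py_alt detected_objects scene_analysis metadata
instance (detected_objects : List (List (String × String))) (scene_analysis : List (String × String)) (metadata : List (String × List String)) (out : List String) : Decidable (Spec_extract_sectors_py detected_objects scene_analysis metadata out) := by unfold Spec_extract_sectors_py; infer_instance

-- ===== CLAIM (what is proved, stated in full; the proofs are below) =====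
def Claim_equal_extract_sectors_py : Prop := ∀ (detected_objects : List (List (String × String))) (scene_analysis : List (String × String)) (metadata : List (String × List String)), Dom_extract_sectors_py detected_objects scene_analysis metadata → Spec_extract_sectors_py detected_objects scene_analysis metadata (extract_sectors_py detected_objects scene_analysis metadata)

-- ===== LEMMAS AND PROOFS =====

-- membership in a set after adding one element
lemma contains_add (s : PySem.Set String) (x y : String) :
    PySem.Set.contains (PySem.Set.add s x) y = (PySem.Set.contains s y || y == x) := by
  by_cases hx : x ∈ s <;> by_cases hv : y = x <;>
    simp [PySem.Set.add, PySem.Set.contains, hx, hv]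

-- membership in the found-set after the fold, characterised over any start set
lemma found_contains (objs : List (List (String × String))) (s0 : PySem.Set String) (sec : String) :
    PySem.Set.contains (objs.foldl
      (fun s obj =>
        match pvKeywordSector.lookup (PySem.Str.lower ((obj.lookup "label").getD "")) with
        | some sector => PySem.Set.add s sector
        | none => s) s0) sec
    = (PySem.Set.contains s0 sec ||
        objs.any (fun obj => pvKeywordSector.lookup (PySem.Str.lower ((obj.lookup "label").getD "")) == some sec)) := by
  induction objs generalizing s0 with
  | nil => simp
  | cons o rest ih =>
    simp only [List.foldl_cons, List.any_cons, ih]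
    cases h : pvKeywordSector.lookup (PySem.Str.lower ((o.lookup "label").getD "")) with
    | none => simp
    | some v =>
      simp only [contains_add]
      have hvc : (sec == v) = (v == sec) := by
        by_cases h2 : sec = v
        · simp [h2]
        · simp [h2, Ne.symm h2]
      cases PySem.Set.contains s0 sec <;> simp [hvc]

-- the lookup table hits exactly the keyword list of each sector
set_option maxRecDepth 8192 in
lemma lookup_keywords (l : String) :
    ((pvKeywordSector.lookup l == some "transportation") = (["vehicle", "truck", "car", "road"] : List String).contains l)
  ∧ ((pvKeywordSector.lookup l == some "logistics") = (["container", "cargo", "crane", "ship", "vessel"] : List String).contains l)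
  ∧ ((pvKeywordSector.lookup l == some "warehousing") = (["warehouse", "building", "storage"] : List String).contains l)
  ∧ ((pvKeywordSector.lookup l == some "energy") = (["pipeline", "refinery", "tank", "power_line"] : List String).contains l)
  ∧ ((pvKeywordSector.lookup l == some "manufacturing") = (["factory", "plant", "industrial"] : List String).contains l) := by
  refine ⟨?_, ?_, ?_, ?_, ?_⟩ <;>
    (simp only [pvKeywordSector, List.lookup, List.contains_cons, List.contains_nil]
     repeat' split) <;> simp_all

-- scanning the keyword list over labels = scanning labels over the keyword list
lemma any_contains_comm (K labels : List String) :
    K.any (fun k => labels.contains k) = labels.any (fun l => K.contains l) := by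
  rw [Bool.eq_iff_iff]
  simp only [List.any_eq_true, List.contains_iff_mem]
  exact ⟨fun ⟨x, h1, h2⟩ => ⟨x, h2, h1⟩, fun ⟨x, h1, h2⟩ => ⟨x, h2, h1⟩⟩

set_option maxHeartbeats 1000000 in
theorem extract_sectors_py_spec : Claim_equal_extract_sectors_py := by
  intro objs sa md _
  unfold Spec_extract_sectors_py extract_sectors_py extract_sectors_py_alt
  by_cases hm : ((md.lookup "sectors_hint").getD []) = []
  · simp only [hm, ne_eq, not_true_eq_false, if_false]
    simp only [pvSectorOrder, List.filter_cons, List.filter_nil]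
    simp only [found_contains]
    have hT := fun l => (lookup_keywords l).1
    have hL := fun l => (lookup_keywords l).2.1
    have hW := fun l => (lookup_keywords l).2.2.1
    have hE := fun l => (lookup_keywords l).2.2.2.1
    have hM := fun l => (lookup_keywords l).2.2.2.2
    simp only [hT, hL, hW, hE, hM]
    have hswap : ∀ (K : List String), (objs.any fun obj => K.contains (PySem.Str.lower ((List.lookup "label" obj).getD ""))) = K.any fun k => (objs.map fun obj => PySem.Str.lower ((List.lookup "label" obj).getD "")).contains k := by
      intro K
      rw [any_contains_comm, List.any_map]
      rfl
    rw [hswap, hswap, hswap, hswap, hswap]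
    generalize ((["vehicle", "truck", "car", "road"] : List String).any fun k => (objs.map fun obj => PySem.Str.lower ((List.lookup "label" obj).getD "")).contains k) = b1
    generalize ((["container", "cargo", "crane", "ship", "vessel"] : List String).any fun k => (objs.map fun obj => PySem.Str.lower ((List.lookup "label" obj).getD "")).contains k) = b2
    generalize ((["warehouse", "building", "storage"] : List String).any fun k => (objs.map fun obj => PySem.Str.lower ((List.lookup "label" obj).getD "")).contains k) = b3
    generalize ((["pipeline", "refinery", "tank", "power_line"] : List String).any fun k => (objs.map fun obj => PySem.Str.lower ((List.lookup "label" obj).getD "")).contains k) = b4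
    generalize ((["factory", "plant", "industrial"] : List String).any fun k => (objs.map fun obj => PySem.Str.lower ((List.lookup "label" obj).getD "")).contains k) = b5
    revert b1 b2 b3 b4 b5
    decide
  · simp [hm]
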